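-- pv_equiv track=rewrite | github.com/james5635/GeekForGeek-Data-Structure-and-Algorithm | sorting/hard/four_sum_closest/solution.py | four_sum_closest_brute_force
-- ===== SOURCE A (Python) =====
-- def four_sum_closest_brute_force(arr, target):
--     """
--     Find closest quadruplet sum using brute force.
--
--     Args:
--         arr: Input array
--         target: Target sum
--
--     Returns:
--         int: Closest sum to target
--     """
--     if not arr or len(arr) < 4:
--         return None
--
--     n = len(arr)
--     closest_sum = float("inf")
--     min_diff = float("inf")
--
--     for i in range(n - 3):
--         for j in range(i + 1, n - 2):
--             for k in range(j + 1, n - 1):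
--                 for l in range(k + 1, n):
--                     current_sum = arr[i] + arr[j] + arr[k] + arr[l]
--                     diff = abs(current_sum - target)
--
--                     if diff < min_diff:
--                         min_diff = diff
--                         closest_sum = current_sum
--                     elif diff == min_diff and current_sum < closest_sum:
--                         closest_sum = current_sum
--
--     return closest_sum
-- ===== SOURCE B (Python) =====
-- # B: same result via a different decomposition: structural choose/skip recursion that
-- # builds the list of all 4-element combination sums, then one flat selection pass with
-- # the lexicographic (|s-target|, s) preference.  Same O(n^4) cost, no index loops.
--
-- def _sums1(xs):
--     return list(xs)
--
-- def _sums2(xs):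
--     if not xs:
--         return []
--     return [xs[0] + s for s in _sums1(xs[1:])] + _sums2(xs[1:])
--
-- def _sums3(xs):
--     if not xs:
--         return []
--     return [xs[0] + s for s in _sums2(xs[1:])] + _sums3(xs[1:])
--
-- def _sums4(xs):
--     if not xs:
--         return []
--     return [xs[0] + s for s in _sums3(xs[1:])] + _sums4(xs[1:])
--
-- def four_sum_closest_brute_force(arr, target):
--     if len(arr) < 4:
--         return None
--     best = None
--     for s in _sums4(arr):
--         if best is None or abs(s - target) < abs(best - target) or (
--             abs(s - target) == abs(best - target) and s < best
--         ):
--             best = s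
--     return best
-- ===== Notes on version B (the rewrite author's own statement) =====
-- stated objective: alternative
-- what changed: Replaces the four nested index loops with incremental (closest_sum, min_diff) state by a structural choose/skip recursion that builds the list of all 4-combination sums, followed by one flat selection pass minimising the lexicographic key (|s-target|, s).
import Mathlib
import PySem

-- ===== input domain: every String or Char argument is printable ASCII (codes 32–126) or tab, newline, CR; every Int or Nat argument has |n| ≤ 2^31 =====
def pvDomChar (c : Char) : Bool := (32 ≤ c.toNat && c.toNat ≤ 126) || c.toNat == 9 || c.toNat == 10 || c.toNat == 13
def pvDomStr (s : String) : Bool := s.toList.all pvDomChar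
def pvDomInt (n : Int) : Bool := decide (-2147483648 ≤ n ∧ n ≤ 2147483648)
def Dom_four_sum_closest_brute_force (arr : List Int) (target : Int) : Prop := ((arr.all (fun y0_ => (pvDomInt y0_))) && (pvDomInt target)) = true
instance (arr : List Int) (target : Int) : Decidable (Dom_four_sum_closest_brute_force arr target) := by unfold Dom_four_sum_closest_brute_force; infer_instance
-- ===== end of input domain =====

-- B replaces the four nested index loops by a choose/skip recursion over the list plus one
-- flat selection pass (objective: alternative structure, same O(n^4) cost, not faster).

-- ===== PORT A =====
-- Python's closest_sum/min_diff both start at float('inf') and are first overwritten together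
-- (diff < inf always holds), so the pair of variables is represented jointly as
-- Option (Int × Int), none standing for the initial (inf, inf) state.
def four_sum_closest_brute_force (arr : List Int) (target : Int) : Option Int :=
  if arr.length < 4 then none
  else
    let n : Int := arr.length
    ((PySem.List.pyRange 0 (n - 3) 1).foldl (fun st i =>
      (PySem.List.pyRange (i + 1) (n - 2) 1).foldl (fun st j =>
        (PySem.List.pyRange (j + 1) (n - 1) 1).foldl (fun st k =>
          (PySem.List.pyRange (k + 1) n 1).foldl (fun st l =>
            let current_sum := PySem.List.pyGetD arr i 0 + PySem.List.pyGetD arr j 0 +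
              PySem.List.pyGetD arr k 0 + PySem.List.pyGetD arr l 0
            let diff := |current_sum - target|
            match st with
            | none => some (current_sum, diff)
            | some (closest, mind) =>
              if diff < mind then some (current_sum, diff)
              else if diff = mind ∧ current_sum < closest then some (current_sum, mind)
              else some (closest, mind)) st) st) st) (none : Option (Int × Int))).map (·.1)

-- ===== PORT B =====
def pvSums1 (xs : List Int) : List Int := xs

def pvSums2 : List Int → List Int
  | [] => []
  | x :: rest => (pvSums1 rest).map (fun s => x + s) ++ pvSums2 rest

def pvSums3 : List Int → List Int
  | [] => []
  | x :: rest => (pvSums2 rest).map (fun s => x + s) ++ pvSums3 rest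

def pvSums4 : List Int → List Int
  | [] => []
  | x :: rest => (pvSums3 rest).map (fun s => x + s) ++ pvSums4 rest

def four_sum_closest_brute_force_alt (arr : List Int) (target : Int) : Option Int :=
  if arr.length < 4 then none
  else
    (pvSums4 arr).foldl (fun best s =>
      match best with
      | none => some s
      | some b =>
        if |s - target| < |b - target| ∨ (|s - target| = |b - target| ∧ s < b)
        then some s else some b) none

-- ===== PRECONDITION & SPEC =====
def Spec_four_sum_closest_brute_force (arr : List Int) (target : Int) (out : Option Int) : Prop := out = four_sum_closest_brute_force_alt arr target
instance (arr : List Int) (target : Int) (out : Option Int) : Decidable (Spec_four_sum_closest_brute_force arr target out) := by unfold Spec_four_sum_closest_brute_force; infer_instance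

-- ===== CLAIM (what is proved, stated in full; the proofs are below) =====
def Claim_equal_four_sum_closest_brute_force : Prop := ∀ (arr : List Int) (target : Int), Dom_four_sum_closest_brute_force arr target → Spec_four_sum_closest_brute_force arr target (four_sum_closest_brute_force arr target)

-- ===== LEMMAS AND PROOFS =====

-- strict "better" order on candidate sums: smaller distance to target, then smaller sum
abbrev pvKlt (t a b : Int) : Prop := |a - t| < |b - t| ∨ (|a - t| = |b - t| ∧ a < b)

def pvUpd (t : Int) (o : Option Int) (s : Int) : Option Int :=
  match o with
  | none => some s
  | some b => if pvKlt t s b then some s else some b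

def pvIsBest (t : Int) (L : List Int) : Option Int → Prop
  | none => L = []
  | some m => m ∈ L ∧ ∀ x ∈ L, ¬ pvKlt t x m

lemma pvKlt_irrefl (t a : Int) : ¬ pvKlt t a a := by
  unfold pvKlt; omega

lemma pvKlt_trans {t a b c : Int} (h1 : pvKlt t a b) (h2 : pvKlt t b c) : pvKlt t a c := by
  unfold pvKlt at *
  rcases abs_cases (a - t) with ⟨e1, _⟩ | ⟨e1, _⟩ <;>
  rcases abs_cases (b - t) with ⟨e2, _⟩ | ⟨e2, _⟩ <;>
  rcases abs_cases (c - t) with ⟨e3, _⟩ | ⟨e3, _⟩ <;> omega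

lemma pvKlt_trichotomy (t a b : Int) : pvKlt t a b ∨ a = b ∨ pvKlt t b a := by
  unfold pvKlt
  rcases abs_cases (a - t) with ⟨e1, _⟩ | ⟨e1, _⟩ <;>
  rcases abs_cases (b - t) with ⟨e2, _⟩ | ⟨e2, _⟩ <;> omega

lemma pvFold_some (t : Int) : ∀ (L : List Int) (b : Int),
    ∃ m, L.foldl (pvUpd t) (some b) = some m ∧ m ∈ b :: L ∧ ∀ x ∈ b :: L, ¬ pvKlt t x m := by
  intro L
  induction L with
  | nil =>
    intro b
    exact ⟨b, rfl, by simp, by simpa using pvKlt_irrefl t b⟩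
  | cons x L ih =>
    intro b
    by_cases h : pvKlt t x b
    · obtain ⟨m, hm, hmem, hmin⟩ := ih x
      refine ⟨m, by simpa [pvUpd, h] using hm, ?_, ?_⟩
      · simp only [List.mem_cons] at hmem ⊢; tauto
      · intro y hy
        rcases List.mem_cons.mp hy with rfl | hy'
        · intro hbm
          exact hmin x (by simp) (pvKlt_trans h hbm)
        · exact hmin y hy'
    · obtain ⟨m, hm, hmem, hmin⟩ := ih b
      refine ⟨m, by simpa [pvUpd, h] using hm, ?_, ?_⟩
      · simp only [List.mem_cons] at hmem ⊢; tauto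
      · intro y hy
        rcases List.mem_cons.mp hy with rfl | hy'
        · exact hmin y (by simp)
        · rcases List.mem_cons.mp hy' with rfl | hy''
          · intro hxm
            rcases pvKlt_trichotomy t b m with h1 | h1 | h1
            · exact hmin b (by simp) h1
            · exact h (h1 ▸ hxm)
            · exact h (pvKlt_trans hxm h1)
          · exact hmin y (by simp [hy''])

lemma pvFold_isBest (t : Int) (L : List Int) : pvIsBest t L (L.foldl (pvUpd t) none) := by
  cases L with
  | nil => simp [pvIsBest]
  | cons x L =>
    have h0 : (x :: L).foldl (pvUpd t) none = L.foldl (pvUpd t) (some x) := rfl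
    obtain ⟨m, hm, hmem, hmin⟩ := pvFold_some t L x
    rw [h0, hm]
    exact ⟨hmem, hmin⟩

lemma pvBest_unique {t : Int} {L L' : List Int} {o1 o2 : Option Int}
    (h1 : pvIsBest t L o1) (h2 : pvIsBest t L' o2) (hmem : ∀ s, s ∈ L ↔ s ∈ L') : o1 = o2 := by
  cases o1 with
  | none =>
    cases o2 with
    | none => rfl
    | some m2 =>
      exfalso
      simp only [pvIsBest] at h1 h2
      have : m2 ∈ L := (hmem m2).mpr h2.1
      simp [h1] at this
  | some m1 =>
    cases o2 with
    | none =>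
      exfalso
      simp only [pvIsBest] at h1 h2
      have : m1 ∈ L' := (hmem m1).mp h1.1
      simp [h2] at this
    | some m2 =>
      simp only [pvIsBest] at h1 h2
      rcases pvKlt_trichotomy t m1 m2 with h | h | h
      · exact absurd h (h2.2 m1 ((hmem m1).mp h1.1))
      · exact congrArg some h
      · exact absurd h (h1.2 m2 ((hmem m2).mpr h2.1))

lemma pvGetD_eq {xs : List Int} {i : ℕ} (h : i < xs.length) : xs.getD i 0 = xs[i] :=
  List.getD_eq_getElem xs 0 h

lemma mem_pvSums1 {xs : List Int} {s : Int} :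
    s ∈ pvSums1 xs ↔ ∃ i : ℕ, i < xs.length ∧ s = xs.getD i 0 := by
  unfold pvSums1
  constructor
  · intro h
    obtain ⟨i, hi, he⟩ := List.mem_iff_getElem.mp h
    exact ⟨i, hi, by rw [pvGetD_eq hi, he]⟩
  · rintro ⟨i, hi, rfl⟩
    rw [pvGetD_eq hi]
    exact List.getElem_mem hi

lemma mem_pvSums2 {xs : List Int} {s : Int} :
    s ∈ pvSums2 xs ↔ ∃ i j : ℕ, i < j ∧ j < xs.length ∧ s = xs.getD i 0 + xs.getD j 0 := by
  induction xs generalizing s with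
  | nil => simp [pvSums2]
  | cons x rest ih =>
    rw [pvSums2, List.mem_append]
    constructor
    · intro h
      rcases h with h | h
      · obtain ⟨a, ha, rfl⟩ := List.mem_map.mp h
        obtain ⟨j, hj, rfl⟩ := mem_pvSums1.mp ha
        exact ⟨0, j + 1, by omega, by simp; omega, by simp⟩
      · obtain ⟨i, j, hij, hj, rfl⟩ := ih.mp h
        exact ⟨i + 1, j + 1, by omega, by simp; omega, by simp⟩
    · rintro ⟨i, j, hij, hj, rfl⟩
      simp only [List.length_cons] at hj
      rcases j with _ | j'
      · omega
      · rcases i with _ | i'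
        · left
          exact List.mem_map.mpr ⟨rest.getD j' 0,
            mem_pvSums1.mpr ⟨j', by omega, rfl⟩, by simp⟩
        · right
          exact ih.mpr ⟨i', j', by omega, by omega, by simp⟩

lemma mem_pvSums3 {xs : List Int} {s : Int} :
    s ∈ pvSums3 xs ↔ ∃ i j k : ℕ, i < j ∧ j < k ∧ k < xs.length ∧
      s = xs.getD i 0 + xs.getD j 0 + xs.getD k 0 := by
  induction xs generalizing s with
  | nil => simp [pvSums3]
  | cons x rest ih =>
    rw [pvSums3, List.mem_append]
    constructor
    · intro h
      rcases h with h | h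
      · obtain ⟨a, ha, rfl⟩ := List.mem_map.mp h
        obtain ⟨j, k, hjk, hk, rfl⟩ := mem_pvSums2.mp ha
        exact ⟨0, j + 1, k + 1, by omega, by omega, by simp; omega, by simp; ring⟩
      · obtain ⟨i, j, k, hij, hjk, hk, rfl⟩ := ih.mp h
        exact ⟨i + 1, j + 1, k + 1, by omega, by omega, by simp; omega, by simp⟩
    · rintro ⟨i, j, k, hij, hjk, hk, rfl⟩
      simp only [List.length_cons] at hk
      rcases k with _ | k'
      · omega
      · rcases i with _ | i'
        · rcases j with _ | j'
          · omega
          · left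
            exact List.mem_map.mpr ⟨rest.getD j' 0 + rest.getD k' 0,
              mem_pvSums2.mpr ⟨j', k', by omega, by omega, rfl⟩, by simp; ring⟩
        · rcases j with _ | j'
          · omega
          · right
            exact ih.mpr ⟨i', j', k', by omega, by omega, by omega, by simp⟩

lemma mem_pvSums4 {xs : List Int} {s : Int} :
    s ∈ pvSums4 xs ↔ ∃ i j k l : ℕ, i < j ∧ j < k ∧ k < l ∧ l < xs.length ∧
      s = xs.getD i 0 + xs.getD j 0 + xs.getD k 0 + xs.getD l 0 := by
  induction xs generalizing s with
  | nil => simp [pvSums4]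
  | cons x rest ih =>
    rw [pvSums4, List.mem_append]
    constructor
    · intro h
      rcases h with h | h
      · obtain ⟨a, ha, rfl⟩ := List.mem_map.mp h
        obtain ⟨j, k, l, hjk, hkl, hl, rfl⟩ := mem_pvSums3.mp ha
        exact ⟨0, j + 1, k + 1, l + 1, by omega, by omega, by omega, by simp; omega,
          by simp; ring⟩
      · obtain ⟨i, j, k, l, hij, hjk, hkl, hl, rfl⟩ := ih.mp h
        exact ⟨i + 1, j + 1, k + 1, l + 1, by omega, by omega, by omega, by simp; omega, by simp⟩
    · rintro ⟨i, j, k, l, hij, hjk, hkl, hl, rfl⟩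
      simp only [List.length_cons] at hl
      rcases l with _ | l'
      · omega
      · rcases i with _ | i'
        · rcases j with _ | j'
          · omega
          · rcases k with _ | k'
            · omega
            · left
              exact List.mem_map.mpr ⟨rest.getD j' 0 + rest.getD k' 0 + rest.getD l' 0,
                mem_pvSums3.mpr ⟨j', k', l', by omega, by omega, by omega, rfl⟩, by simp; ring⟩
        · rcases j with _ | j'
          · omega
          · rcases k with _ | k'
            · omega
            · right
              exact ih.mpr ⟨i', j', k', l', by omega, by omega, by omega, by omega, by simp⟩

def pvAList (arr : List Int) : List Int :=
  (PySem.List.pyRange 0 ((arr.length : Int) - 3) 1).flatMap (fun i =>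
    (PySem.List.pyRange (i + 1) ((arr.length : Int) - 2) 1).flatMap (fun j =>
      (PySem.List.pyRange (j + 1) ((arr.length : Int) - 1) 1).flatMap (fun k =>
        (PySem.List.pyRange (k + 1) (arr.length : Int) 1).map (fun l =>
          PySem.List.pyGetD arr i 0 + PySem.List.pyGetD arr j 0 +
          PySem.List.pyGetD arr k 0 + PySem.List.pyGetD arr l 0))))

lemma pvFoldl_flatMap {α β σ : Type} (g : α → List β) (f : σ → β → σ) :
    ∀ (L : List α) (init : σ),
      (L.flatMap g).foldl f init = L.foldl (fun acc x => (g x).foldl f acc) init := by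
  intro L
  induction L with
  | nil => intro init; rfl
  | cons x L ih => intro init; simp [List.flatMap_cons, List.foldl_append, ih]

def pvUpdA (t : Int) (st : Option (Int × Int)) (s : Int) : Option (Int × Int) :=
  match st with
  | none => some (s, |s - t|)
  | some (closest, mind) =>
    if |s - t| < mind then some (s, |s - t|)
    else if |s - t| = mind ∧ s < closest then some (s, mind)
    else some (closest, mind)

lemma pvUpdA_map (t : Int) (o : Option Int) (s : Int) :
    pvUpdA t (o.map (fun c => (c, |c - t|))) s = (pvUpd t o s).map (fun c => (c, |c - t|)) := by
  cases o with
  | none => rfl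
  | some b =>
    simp only [Option.map_some, pvUpdA, pvUpd]
    by_cases h1 : |s - t| < |b - t|
    · rw [if_pos h1, if_pos (Or.inl h1)]
      rfl
    · by_cases h2 : |s - t| = |b - t| ∧ s < b
      · rw [if_neg h1, if_pos h2, if_pos (Or.inr h2)]
        simp [h2.1]
      · rw [if_neg h1, if_neg h2, if_neg (by tauto)]
        rfl

lemma pvFoldA_map (t : Int) : ∀ (L : List Int) (o : Option Int),
    L.foldl (pvUpdA t) (o.map (fun c => (c, |c - t|))) =
      (L.foldl (pvUpd t) o).map (fun c => (c, |c - t|)) := by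
  intro L
  induction L with
  | nil => intro o; rfl
  | cons x L ih => intro o; simp [List.foldl_cons, pvUpdA_map, ih]

lemma pvA_eq (arr : List Int) (t : Int) :
    four_sum_closest_brute_force arr t =
      if arr.length < 4 then none else (pvAList arr).foldl (pvUpd t) none := by
  by_cases h : arr.length < 4
  · simp [four_sum_closest_brute_force, h]
  · rw [four_sum_closest_brute_force, if_neg h, if_neg h]
    have h1 : (pvAList arr).foldl (pvUpdA t) (none : Option (Int × Int)) =
        ((pvAList arr).foldl (pvUpd t) none).map (fun c => (c, |c - t|)) := by
      simpa using pvFoldA_map t (pvAList arr) none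
    have h2 : (pvAList arr).foldl (pvUpdA t) (none : Option (Int × Int)) =
        (PySem.List.pyRange 0 ((arr.length : Int) - 3) 1).foldl (fun st i =>
          (PySem.List.pyRange (i + 1) ((arr.length : Int) - 2) 1).foldl (fun st j =>
            (PySem.List.pyRange (j + 1) ((arr.length : Int) - 1) 1).foldl (fun st k =>
              (PySem.List.pyRange (k + 1) (arr.length : Int) 1).foldl (fun st l =>
                pvUpdA t st (PySem.List.pyGetD arr i 0 + PySem.List.pyGetD arr j 0 +
                  PySem.List.pyGetD arr k 0 + PySem.List.pyGetD arr l 0)) st) st) st) none := by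
      rw [pvAList, pvFoldl_flatMap]
      congr 1
      funext st i
      rw [pvFoldl_flatMap]
      congr 1
      funext st j
      rw [pvFoldl_flatMap]
      congr 1
      funext st k
      rw [List.foldl_map]
    rw [show ∀ st : Option (Int × Int), st.map (·.1) = st.map Prod.fst from fun st => rfl]
    calc _ = ((pvAList arr).foldl (pvUpdA t) none).map Prod.fst := by rw [h2]; rfl
      _ = _ := by
          rw [h1]
          cases (pvAList arr).foldl (pvUpd t) none <;> rfl

lemma pvB_eq (arr : List Int) (t : Int) :
    four_sum_closest_brute_force_alt arr t =
      if arr.length < 4 then none else (pvSums4 arr).foldl (pvUpd t) none := by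
  rfl

lemma mem_pvAList {arr : List Int} {s : Int} :
    s ∈ pvAList arr ↔ ∃ i j k l : ℕ, i < j ∧ j < k ∧ k < l ∧ l < arr.length ∧
      s = arr.getD i 0 + arr.getD j 0 + arr.getD k 0 + arr.getD l 0 := by
  have e : ∀ (m : Int), 0 ≤ m → PySem.List.pyGetD arr m 0 = arr.getD m.toNat 0 := by
    intro m hm
    rw [← Int.toNat_of_nonneg hm, PySem.List.pyGetD_natCast, Int.toNat_natCast]
  rw [pvAList]
  simp only [List.mem_flatMap, List.mem_map, PySem.List.mem_pyRange_one]
  constructor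
  · rintro ⟨i, ⟨hi0, hi⟩, j, ⟨hij, hj⟩, k, ⟨hjk, hk⟩, l, ⟨hkl, hl⟩, rfl⟩
    refine ⟨i.toNat, j.toNat, k.toNat, l.toNat, by omega, by omega, by omega, by omega, ?_⟩
    rw [e i (by omega), e j (by omega), e k (by omega), e l (by omega)]
  · rintro ⟨i, j, k, l, hij, hjk, hkl, hl, rfl⟩
    refine ⟨(i : Int), ⟨by omega, by omega⟩, (j : Int), ⟨by omega, by omega⟩,
      (k : Int), ⟨by omega, by omega⟩, (l : Int), ⟨by omega, by omega⟩, ?_⟩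
    rw [e i (by omega), e j (by omega), e k (by omega), e l (by omega)]
    simp

-- ===== VERDICT (by name: the statement is the Claim_ definition above) =====
theorem four_sum_closest_brute_force_spec : Claim_equal_four_sum_closest_brute_force := by
  intro arr target _
  unfold Spec_four_sum_closest_brute_force
  rw [pvA_eq, pvB_eq]
  by_cases h : arr.length < 4
  · simp [h]
  · simp only [h]
    exact pvBest_unique (pvFold_isBest target (pvAList arr)) (pvFold_isBest target (pvSums4 arr))
      (fun s => by rw [mem_pvAList, mem_pvSums4])
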